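-- pv_equiv track=rewrite | github.com/leodev12345/GitPi | app/app.py | organize_files
-- ===== SOURCE A (Python) =====
-- def organize_files(file_list, name, branch):
--     lines = file_list.strip().split('\n')
--     file_structure = {}
--
--     for line in lines:
--         parts = line.split('/')
--         current = file_structure
--
--         for part in parts:
--             if part not in current:
--                 current[part] = {}
--             current = current[part]
--
--     def create_structure(structure, indent=""):
--         result = ""
--         keys = list(structure.keys())
--         for index, name in enumerate(keys):
--             content = structure[name]
--             last_item = index == len(keys) - 1
--
--             if content:
--                 result += f"{indent}{'└─ ' if last_item else '├─ '}{name}/\n"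
--                 result += create_structure(content, indent + ('    ' if last_item else '│  '))
--             else:
--                 result += f"{indent}{'└─ ' if last_item else '├─ '}{name}\n"
--         return result
--
--     organized_files = create_structure(file_structure)
--     organized_files = f"{name}.git➔{branch}\n{organized_files}"
--
--     return organized_files
-- ===== SOURCE B (Python) =====
-- def organize_files(file_list, name, branch):
--     # same trie building as before
--     root = {}
--     for line in file_list.strip().split('\n'):
--         cur = root
--         for part in line.split('/'):
--             cur = cur.setdefault(part, {})
--
--     # explicit stack-based DFS instead of recursion
--     pieces = []
--     stack = []
--     items = list(root.items())
--     for i in range(len(items) - 1, -1, -1):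
--         k, sub = items[i]
--         stack.append((k, sub, "", i == len(items) - 1))
--     while stack:
--         k, sub, indent, last = stack.pop()
--         glyph = '└─ ' if last else '├─ '
--         if sub:
--             pieces.append(f"{indent}{glyph}{k}/\n")
--             ext = indent + ('    ' if last else '│  ')
--             children = list(sub.items())
--             for i in range(len(children) - 1, -1, -1):
--                 ck, csub = children[i]
--                 stack.append((ck, csub, ext, i == len(children) - 1))
--         else:
--             pieces.append(f"{indent}{glyph}{k}\n")
--     return f"{name}.git➔{branch}\n" + "".join(pieces)
-- ===== Notes on version B (the rewrite author's own statement) =====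
-- stated objective: alternative
-- what changed: The recursive create_structure renderer is replaced by an iterative explicit-stack DFS: entries (key, subtree, indent, is_last) are popped from a stack, their line is emitted, and their children are pushed in reverse order; lines are collected in a list and joined once.
import Mathlib
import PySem

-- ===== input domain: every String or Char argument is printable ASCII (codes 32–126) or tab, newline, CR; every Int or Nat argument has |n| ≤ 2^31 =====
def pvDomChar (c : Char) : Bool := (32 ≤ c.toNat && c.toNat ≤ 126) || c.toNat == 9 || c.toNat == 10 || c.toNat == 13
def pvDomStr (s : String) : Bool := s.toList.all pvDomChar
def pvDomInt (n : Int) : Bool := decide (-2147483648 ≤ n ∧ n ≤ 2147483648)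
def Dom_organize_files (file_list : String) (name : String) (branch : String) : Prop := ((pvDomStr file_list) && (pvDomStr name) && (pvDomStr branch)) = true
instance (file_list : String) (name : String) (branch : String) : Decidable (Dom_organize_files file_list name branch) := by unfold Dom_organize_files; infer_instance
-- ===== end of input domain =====

-- B replaces the recursive tree renderer by an explicit-stack iterative DFS (same trie-building loop); equivalence of the rendered string is proved for all inputs.

-- ===== PORT A =====
-- The nested Python dicts {part: {...}} become a mutual trie (explicit child list, insertion order kept).
mutual
inductive Trie where
  | node : TrieList → Trie
  deriving DecidableEq
inductive TrieList where
  | nil : TrieList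
  | cons : String → Trie → TrieList → TrieList
  deriving DecidableEq
end

def TrieList.find? : TrieList → String → Option Trie
  | .nil, _ => none
  | .cons k t r, key => if k = key then some t else r.find? key

-- dict assignment: overwrite in place, append a fresh key at the end
def TrieList.set : TrieList → String → Trie → TrieList
  | .nil, key, v => .cons key v .nil
  | .cons k t r, key, v => if k = key then .cons k v r else .cons k t (r.set key v)

def TrieList.isNil : TrieList → Bool
  | .nil => true
  | .cons _ _ _ => false

-- the inner 'for part in parts' walk: 'if part not in current: current[part] = {}' then descend
def Trie.insertPath : Trie → List String → Trie
  | t, [] => t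
  | .node l, p :: ps =>
    match l.find? p with
    | some sub => .node (l.set p (sub.insertPath ps))
    | none => .node (l.set p ((Trie.node .nil).insertPath ps))

-- the trie-building loop, identical in both Pythons (A: membership test + assignment, B: setdefault)
def buildTrie (lines : List String) : Trie :=
  lines.foldl (fun t line => t.insertPath ((PySem.Str.split? line "/").getD [])) (.node .nil)

-- A's recursive create_structure (enumerate with last_item = index == len-1 becomes recursion whose 'last' is 'rest is empty')
def create_structure : TrieList → String → String
  | .nil, _ => ""
  | .cons k (.node c) rest, indent =>
    (if c.isNil = false then
      indent ++ (if rest.isNil then "└─ " else "├─ ") ++ k ++ "/\n"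
        ++ create_structure c (indent ++ (if rest.isNil then "    " else "│  "))
    else
      indent ++ (if rest.isNil then "└─ " else "├─ ") ++ k ++ "\n")
    ++ create_structure rest indent

def organize_files (file_list : String) (name : String) (branch : String) : String :=
  let lines := (PySem.Str.split? (PySem.Str.strip file_list) "\n").getD []
  match buildTrie lines with
  | .node c => name ++ ".git➔" ++ branch ++ "\n" ++ create_structure c ""

-- ===== PORT B =====
-- B pushes children in reverse on an array stack so they pop in order; with the Lean stack's
-- head as top, that net effect is prepending the entries in insertion order:
def entriesOf : TrieList → String → List (String × Trie × String × Bool)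
  | .nil, _ => []
  | .cons k t r, ind => (k, t, ind, r.isNil) :: entriesOf r ind

-- weight measure for the while-loop's termination (number of trie nodes below)
def TrieList.w : TrieList → Nat
  | .nil => 0
  | .cons _ (.node c) r => 1 + c.w + r.w

def stackW : List (String × Trie × String × Bool) → Nat
  | [] => 0
  | (_, .node c, _, _) :: r => 1 + c.w + stackW r

theorem stackW_append_entriesOf : ∀ (c : TrieList) (e : String)
    (rest : List (String × Trie × String × Bool)),
    stackW (entriesOf c e ++ rest) = c.w + stackW rest
  | .nil, e, rest => by simp [entriesOf, TrieList.w]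
  | .cons k (.node cc) r, e, rest => by
    simp [entriesOf, stackW, TrieList.w, stackW_append_entriesOf r e rest]; omega

-- the 'while stack:' loop: pop an entry, emit its line, push its children (reversed)
def loopB : List (String × Trie × String × Bool) → List String → List String
  | [], pieces => pieces
  | (k, .node c, ind, last) :: rest, pieces =>
    if c.isNil = false then
      loopB (entriesOf c (ind ++ (if last then "    " else "│  ")) ++ rest)
            (pieces ++ [ind ++ (if last then "└─ " else "├─ ") ++ k ++ "/\n"])
    else
      loopB rest (pieces ++ [ind ++ (if last then "└─ " else "├─ ") ++ k ++ "\n"])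
termination_by st _ => stackW st
decreasing_by
  all_goals simp [stackW, stackW_append_entriesOf]; try omega

def organize_files_alt (file_list : String) (name : String) (branch : String) : String :=
  let lines := (PySem.Str.split? (PySem.Str.strip file_list) "\n").getD []
  match buildTrie lines with
  | .node c =>
    let pieces := loopB (entriesOf c "") []
    name ++ ".git➔" ++ branch ++ "\n" ++ PySem.Str.join "" pieces

-- ===== PRECONDITION & SPEC =====
def Spec_organize_files (file_list : String) (name : String) (branch : String) (out : String) : Prop := out = organize_files_alt file_list name branch
instance (file_list : String) (name : String) (branch : String) (out : String) : Decidable (Spec_organize_files file_list name branch out) := by unfold Spec_organize_files; infer_instance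

-- ===== CLAIM (what is proved, stated in full; the proofs are below) =====
def Claim_equal_organize_files : Prop := ∀ (file_list : String) (name : String) (branch : String), Dom_organize_files file_list name branch → Spec_organize_files file_list name branch (organize_files file_list name branch)

-- ===== LEMMAS AND PROOFS =====

-- concatenation of a list of strings
def cat : List String → String
  | [] => ""
  | s :: r => s ++ cat r

theorem cat_append (l₁ l₂ : List String) : cat (l₁ ++ l₂) = cat l₁ ++ cat l₂ := by
  induction l₁ with
  | nil => simp [cat]
  | cons s r ih => simp [cat, ih, String.append_assoc]

theorem join_empty_eq_cat (l : List String) : PySem.Str.join "" l = cat l := by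
  induction l with
  | nil => rfl
  | cons s r ih =>
    cases r with
    | nil => simp [PySem.Str.join, cat, String.append_empty]
    | cons t r' => rw [cat, ← ih]; simp [PySem.Str.join, PySem.Chars.join_cons_cons]

-- the line(s) contributed by one stack entry in A's recursive rendering
def item : String × Trie × String × Bool → String
  | (k, .node c, ind, last) =>
    if c.isNil = false then
      ind ++ (if last then "└─ " else "├─ ") ++ k ++ "/\n"
        ++ create_structure c (ind ++ (if last then "    " else "│  "))
    else
      ind ++ (if last then "└─ " else "├─ ") ++ k ++ "\n"

theorem create_structure_eq_cat_items : ∀ (s : TrieList) (ind : String),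
    create_structure s ind = cat ((entriesOf s ind).map item)
  | .nil, _ => rfl
  | .cons k (.node c) r, ind => by
    simp only [create_structure, entriesOf, List.map, cat, item,
      create_structure_eq_cat_items r ind]

theorem loopB_cat (st : List (String × Trie × String × Bool)) (pieces : List String) :
    cat (loopB st pieces) = cat pieces ++ cat (st.map item) := by
  induction st, pieces using loopB.induct with
  | case1 pieces => simp [loopB, cat, String.append_empty]
  | case2 k c ind last rest pieces hne ih =>
    simp only [dite_eq_ite] at ih
    rw [loopB]
    simp only [hne, if_true]
    rw [ih, cat_append, List.map_append, cat_append]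
    simp [cat, item, hne, create_structure_eq_cat_items, String.append_assoc,
      String.append_empty]
  | case3 k c ind last rest pieces hne ih =>
    simp only [dite_eq_ite] at ih
    have hc : c.isNil = true := by revert hne; cases c.isNil <;> simp
    rw [loopB]
    simp only [hc, Bool.true_eq_false, if_false]
    rw [ih, cat_append]
    simp [cat, item, hc, String.append_assoc, String.append_empty]

-- ===== VERDICT (by name: the statement is the Claim_ definition above) =====
theorem organize_files_spec : Claim_equal_organize_files := by
  intro file_list name branch _
  unfold Spec_organize_files organize_files organize_files_alt
  cases h : buildTrie ((PySem.Str.split? (PySem.Str.strip file_list) "\n").getD []) with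
  | node c =>
    simp only [join_empty_eq_cat, loopB_cat, cat, String.empty_append,
      create_structure_eq_cat_items]
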